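-- pv_equiv track=rewrite | github.com/liwamio/ADM-Hw3-Gr8 | ADM_Hw3/functions.py | list_query
-- ===== SOURCE A (Python) =====
-- def list_query(l):
--     r=[]
--     while l!=[]:
--         i=l[0]
--         n=l.count(i)
--         r.append(n)
--         l.remove(i)
--     return r
-- ===== SOURCE B (Python) =====
-- def list_query(l):
--     # One right-to-left pass: counter[x] after seeing x at position j holds the
--     # number of occurrences of x in l[j:]; reverse the collected counts at the end.
--     # (Unlike A, this does not mutate l; the equivalence is about the return value.)
--     cnt = {}
--     res = []
--     for x in reversed(l):
--         c = cnt.get(x, 0) + 1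
--         cnt[x] = c
--         res.append(c)
--     res.reverse()
--     return res
-- ===== Notes on version B (the rewrite author's own statement) =====
-- stated objective: faster
-- what changed: Replaces the quadratic loop of l.count/l.remove passes with a single right-to-left pass that maintains a dict counter and reverses the collected counts.
import Mathlib
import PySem

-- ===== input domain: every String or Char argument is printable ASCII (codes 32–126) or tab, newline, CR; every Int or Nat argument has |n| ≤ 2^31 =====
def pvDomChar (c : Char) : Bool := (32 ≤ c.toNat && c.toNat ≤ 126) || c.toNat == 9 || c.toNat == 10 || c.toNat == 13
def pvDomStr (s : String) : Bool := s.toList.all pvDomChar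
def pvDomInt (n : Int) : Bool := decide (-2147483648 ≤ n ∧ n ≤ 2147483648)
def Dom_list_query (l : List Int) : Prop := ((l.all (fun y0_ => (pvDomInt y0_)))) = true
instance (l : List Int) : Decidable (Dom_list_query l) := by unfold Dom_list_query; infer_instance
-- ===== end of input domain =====

-- B replaces A's quadratic count/remove loop with one right-to-left counting pass
-- (asymptotically faster). A empties its argument in place; the equivalence proved
-- here is about the return value only.


-- ===== PORT A =====
-- while l != []: i = l[0]; n = l.count(i); r.append(n); l.remove(i)
-- l.remove(i) with i = l[0] removes the head, so the loop walks down the tail.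
def list_query (l : List Int) : List Int :=
  match l with
  | [] => []
  | i :: t => (PySem.List.count (i :: t) i : Int) :: list_query t

-- ===== PORT B =====
-- for x in reversed(l): c = cnt.get(x,0)+1; cnt[x] = c; res.append(c); then res reversed
def list_query_alt (l : List Int) : List Int :=
  (l.reverse.foldl
    (fun (acc : PySem.Dict Int Int × List Int) x =>
      let c := acc.1.getD x 0 + 1
      (acc.1.insert x c, acc.2 ++ [c]))
    (PySem.Dict.empty, [])).2.reverse

-- ===== PRECONDITION & SPEC =====
def Spec_list_query (l : List Int) (out : List Int) : Prop := out = list_query_alt l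
instance (l : List Int) (out : List Int) : Decidable (Spec_list_query l out) := by unfold Spec_list_query; infer_instance

-- ===== CLAIM (what is proved, stated in full; the proofs are below) =====
def Claim_equal_list_query : Prop := ∀ (l : List Int), Dom_list_query l → Spec_list_query l (list_query l)

-- ===== LEMMAS AND PROOFS =====

-- counts produced by B's loop when started with counter d: position j gets
-- d.getD l[j] 0 + (count of l[j] in the suffix from j)
def pvSeq (d : PySem.Dict Int Int) : List Int → List Int
  | [] => []
  | i :: t => (d.getD i 0 + (PySem.List.count (i :: t) i : Int)) :: pvSeq d t

theorem pvLoop_inv (l : List Int) (d : PySem.Dict Int Int) (r : List Int) :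
    (l.reverse.foldl
      (fun (acc : PySem.Dict Int Int × List Int) x =>
        let c := acc.1.getD x 0 + 1
        (acc.1.insert x c, acc.2 ++ [c]))
      (d, r)).2 = r ++ (pvSeq d l).reverse ∧
    ∀ x, (l.reverse.foldl
      (fun (acc : PySem.Dict Int Int × List Int) x =>
        let c := acc.1.getD x 0 + 1
        (acc.1.insert x c, acc.2 ++ [c]))
      (d, r)).1.getD x 0 = d.getD x 0 + (PySem.List.count l x : Int) := by
  induction l generalizing r with
  | nil => simp [pvSeq, PySem.List.count_eq]
  | cons i t ih =>
    obtain ⟨h2, h1⟩ := ih r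
    rw [List.reverse_cons, List.foldl_append]
    constructor
    · simp only [List.foldl, h2, h1 i, pvSeq, List.reverse_cons, List.append_assoc]
      congr 2
      simp [PySem.List.count_eq]
      ring
    · intro x
      simp only [List.foldl, PySem.Dict.getD_insert, h1]
      by_cases hx : x = i
      · subst hx
        simp [PySem.List.count_eq]
        ring
      · simp [hx, PySem.List.count_eq, Ne.symm hx]

theorem pvSeq_empty (l : List Int) : pvSeq PySem.Dict.empty l = list_query l := by
  induction l with
  | nil => rfl
  | cons i t ih => simp [pvSeq, list_query, ih]

-- ===== VERDICT (by name: the statement is the Claim_ definition above) =====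
theorem list_query_spec : Claim_equal_list_query := by
  intro l _
  unfold Spec_list_query list_query_alt
  rw [(pvLoop_inv l PySem.Dict.empty []).1]
  simp [pvSeq_empty]
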